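-- pv_equiv track=rewrite | github.com/Youyouz/testgit | leetcode/breakfast.py | breakfastNumber
-- ===== SOURCE A (Python) =====
-- from typing import List
--
-- def breakfastNumber(staple: List[int], drinks: List[int], x: int) -> int:
--     staple.sort()
--     drinks.sort()
--     m, n = len(staple), len(drinks)
--     nums, i, j = 0, 0, n - 1
--     while i < m and j >= 0:
--         if staple[i] + drinks[j] <= x:
--             nums += j + 1
--             i += 1
--         else:
--             j -= 1
--     return nums % 1000000007
-- ===== SOURCE B (Python) =====
-- from typing import List
--
-- def _bisect_right(a: List[int], key: int) -> int:
--     # index of first element > key in sorted a == count of elements <= key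
--     lo, hi = 0, len(a)
--     while lo < hi:
--         mid = (lo + hi) // 2
--         if key < a[mid]:
--             hi = mid
--         else:
--             lo = mid + 1
--     return lo
--
-- def breakfastNumber(staple: List[int], drinks: List[int], x: int) -> int:
--     staple.sort()
--     drinks.sort()
--     total = 0
--     for s in staple:
--         total += _bisect_right(drinks, x - s)
--     return total % 1000000007
-- ===== Notes on version B (the rewrite author's own statement) =====
-- stated objective: alternative
-- what changed: Replaces the coordinated two-pointer sweep over both sorted arrays with a per-staple binary search (hand-rolled bisect_right) into the sorted drinks array, summing the counts.
import Mathlib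
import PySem

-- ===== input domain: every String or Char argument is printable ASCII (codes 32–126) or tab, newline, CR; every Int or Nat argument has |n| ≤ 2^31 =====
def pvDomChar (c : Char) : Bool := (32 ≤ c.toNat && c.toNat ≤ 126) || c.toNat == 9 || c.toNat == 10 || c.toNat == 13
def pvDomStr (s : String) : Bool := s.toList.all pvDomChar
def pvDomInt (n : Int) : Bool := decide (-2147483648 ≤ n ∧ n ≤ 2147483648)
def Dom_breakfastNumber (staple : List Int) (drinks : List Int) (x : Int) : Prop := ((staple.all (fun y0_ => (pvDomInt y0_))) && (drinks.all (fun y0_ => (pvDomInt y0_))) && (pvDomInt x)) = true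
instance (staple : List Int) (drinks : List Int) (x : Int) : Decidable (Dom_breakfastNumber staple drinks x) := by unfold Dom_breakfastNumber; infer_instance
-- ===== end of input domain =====

-- ===== PORT A =====
-- Port of A. Python A sorts both argument lists IN PLACE; the equivalence proved
-- here is about the RETURN value only (B performs the same in-place sorts).
-- A's while loop over indices i (up staple) and j (down drinks) is the obvious
-- structural recursion over (remaining staple, reversed prefix of drinks): j+1 is
-- the length of the remaining reversed prefix.
def loopA (x : Int) : List Int → List Int → Int → Int
  | [], _, nums => nums
  | _ :: _, [], nums => nums
  | s :: S, d :: R, nums =>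
      if s + d ≤ x then loopA x S (d :: R) (nums + ((R.length : Int) + 1))
      else loopA x (s :: S) R nums
termination_by S R _ => S.length + R.length

def breakfastNumber (staple : List Int) (drinks : List Int) (x : Int) : Int :=
  let S := PySem.List.sorted staple (fun y => y)
  let D := PySem.List.sorted drinks (fun y => y)
  PySem.Int.mod (loopA x S D.reverse 0) 1000000007

-- ===== PORT B =====
-- transliteration of Source B's hand-rolled bisect_right: binary search, lo/hi as Nat
-- (both stay nonnegative in Python); a[mid] is always in range (lo < hi ≤ len a),
-- ported as getD (exact on in-range indices).
def bsLoop (a : List Int) (key : Int) (lo hi : Nat) : Nat :=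
  if _h : lo < hi then
    if key < a.getD ((lo + hi) / 2) 0 then bsLoop a key lo ((lo + hi) / 2)
    else bsLoop a key ((lo + hi) / 2 + 1) hi
  else lo
termination_by hi - lo

def bisectRightB (a : List Int) (key : Int) : Nat := bsLoop a key 0 a.length

def breakfastNumber_alt (staple : List Int) (drinks : List Int) (x : Int) : Int :=
  let S := PySem.List.sorted staple (fun y => y)
  let D := PySem.List.sorted drinks (fun y => y)
  PySem.Int.mod (S.foldl (fun total s => total + (bisectRightB D (x - s) : Int)) 0) 1000000007

-- ===== PRECONDITION & SPEC =====
def Spec_breakfastNumber (staple : List Int) (drinks : List Int) (x : Int) (out : Int) : Prop := out = breakfastNumber_alt staple drinks x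
instance (staple : List Int) (drinks : List Int) (x : Int) (out : Int) : Decidable (Spec_breakfastNumber staple drinks x out) := by unfold Spec_breakfastNumber; infer_instance

-- ===== CLAIM =====
def Claim_equal_breakfastNumber : Prop := ∀ (staple : List Int) (drinks : List Int) (x : Int), Dom_breakfastNumber staple drinks x → Spec_breakfastNumber staple drinks x (breakfastNumber staple drinks x)

-- ===== LEMMAS AND PROOFS =====

-- binary-search invariant: on a sorted list, with all indices < lo known ≤ key and
-- all indices ≥ hi known > key, bsLoop returns the count of elements ≤ key as a
-- prefix bound.
theorem bsLoop_inv (a : List Int) (key : Int) (hD : a.Pairwise (· ≤ ·)) :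
    ∀ lo hi, lo ≤ hi → hi ≤ a.length →
    (∀ j, j < lo → (hj : j < a.length) → a[j] ≤ key) →
    (∀ j, hi ≤ j → (hj : j < a.length) → key < a[j]) →
    bsLoop a key lo hi ≤ a.length ∧
      ∀ j, (hj : j < a.length) → (a[j] ≤ key ↔ j < bsLoop a key lo hi) := by
  intro lo hi
  induction lo, hi using bsLoop.induct a key with
  | case1 lo hi h hlt ih =>
    intro hle hhi hlo hhiP
    rw [bsLoop, dif_pos h, if_pos hlt]
    have hmlt : (lo + hi) / 2 < a.length := by omega
    rw [List.getD_eq_getElem a 0 hmlt] at hlt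
    refine ih (by omega) (by omega) hlo ?_
    intro j hj hjlen
    have hmono := List.pairwise_iff_getElem.mp hD
    rcases Nat.eq_or_lt_of_le hj with rfl | hlt2
    · exact hlt
    · exact lt_of_lt_of_le hlt (hmono _ _ hmlt hjlen hlt2)
  | case2 lo hi h hlt ih =>
    intro hle hhi hlo hhiP
    rw [bsLoop, dif_pos h, if_neg hlt]
    have hmlt : (lo + hi) / 2 < a.length := by omega
    rw [List.getD_eq_getElem a 0 hmlt] at hlt
    rw [not_lt] at hlt
    refine ih (by omega) hhi ?_ hhiP
    intro j hj hjlen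
    have hmono := List.pairwise_iff_getElem.mp hD
    rcases Nat.lt_or_ge j ((lo + hi) / 2) with hlt2 | hge
    · exact le_trans (hmono _ _ hjlen hmlt hlt2) hlt
    · have hje : j = (lo + hi) / 2 := by omega
      subst hje; exact hlt
  | case3 lo hi h =>
    intro hle hhi hlo hhiP
    rw [bsLoop, dif_neg h]
    have heq : lo = hi := by omega
    subst heq
    refine ⟨hhi, ?_⟩
    intro j hj
    constructor
    · intro hle2
      by_contra hnot
      exact absurd hle2 (not_le.mpr (hhiP j (by omega) hj))
    · intro hjlt; exact hlo j hjlt hj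

-- a prefix-characterised predicate counts to its cut point
theorem countP_prefix (p : Int → Bool) :
    ∀ (D : List Int) (k : Nat), k ≤ D.length →
    (∀ j, (hj : j < D.length) → (p D[j] = true ↔ j < k)) →
    D.countP p = k := by
  intro D
  induction D with
  | nil => intro k hk _; simp at hk; simp [hk]
  | cons d D' ih =>
    intro k hk h
    cases k with
    | zero =>
      have h00 := h 0 (by simp)
      simp only [List.getElem_cons_zero, Nat.lt_irrefl, iff_false] at h00
      have h0 : p d = false := by simpa using h00
      have hrec : D'.countP p = 0 := by
        refine ih 0 (by omega) ?_
        intro j hj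
        have h2 := h (j + 1) (by simp; omega)
        simpa using h2
      simp [h0, hrec]
    | succ k' =>
      have h00 := h 0 (by simp)
      simp only [List.getElem_cons_zero] at h00
      have h0 : p d = true := h00.mpr (by omega)
      have hrec : D'.countP p = k' := by
        refine ih k' (by simp at hk; omega) ?_
        intro j hj
        have h2 := h (j + 1) (by simp; omega)
        simp only [List.getElem_cons_succ] at h2
        rw [h2]; omega
      simp [h0, hrec]

-- bisectRightB computes, on a sorted list, the number of elements ≤ key
theorem bisectRightB_eq_countP (a : List Int) (key : Int) (hD : a.Pairwise (· ≤ ·)) :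
    (a.countP (fun d => decide (d ≤ key))) = bisectRightB a key := by
  have h := bsLoop_inv a key hD 0 a.length (by omega) le_rfl
      (by intro j hj _; omega) (by intro j hj hjl; omega)
  refine countP_prefix _ a (bisectRightB a key) h.1 ?_
  intro j hj
  have := h.2 j hj
  simpa using this

-- the two-pointer loop totals, over each remaining staple, the number of remaining
-- (reversed, descending) drinks it pairs with
theorem loopA_spec (x : Int) :
    ∀ (S R : List Int) (nums : Int), S.Pairwise (· ≤ ·) →
    R.Pairwise (fun a b => b ≤ a) →
    loopA x S R nums =
      nums + (S.map (fun s => ((R.countP (fun d => decide (s + d ≤ x)) : Nat) : Int))).sum := by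
  intro S R nums
  induction S, R, nums using loopA.induct x with
  | case1 R nums => intro _ _; simp [loopA]
  | case2 s S nums => intro _ _; simp [loopA]
  | case3 s S d R nums hcond ih =>
    intro hS hR
    rw [loopA, if_pos hcond, ih (List.Pairwise.sublist (List.sublist_cons_self s S) hS) hR]
    have hall : (d :: R).countP (fun e => decide (s + e ≤ x)) = (d :: R).length := by
      rw [List.countP_eq_length]
      intro e he
      have hed : e ≤ d := by
        rcases List.mem_cons.mp he with h | h
        · exact le_of_eq h
        · exact (List.pairwise_cons.mp hR).1 e h
      simp; omega
    simp only [List.map_cons, List.sum_cons, hall]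
    simp [List.length_cons]
    ring
  | case4 s S d R nums hcond ih =>
    intro hS hR
    rw [loopA, if_neg hcond, ih hS (List.Pairwise.sublist (List.sublist_cons_self d R) hR)]
    have hmin : ∀ s' ∈ s :: S, s ≤ s' := by
      intro s' hs'
      rcases List.mem_cons.mp hs' with h | h
      · exact le_of_eq h.symm
      · exact (List.pairwise_cons.mp hS).1 s' h
    have : ((s :: S).map (fun s' => (((d :: R).countP (fun e => decide (s' + e ≤ x)) : Nat) : Int)))
         = ((s :: S).map (fun s' => ((R.countP (fun e => decide (s' + e ≤ x)) : Nat) : Int))) := by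
      refine List.map_congr_left ?_
      intro s' hs'
      have hs : s ≤ s' := hmin s' hs'
      have hd : (decide (s' + d ≤ x)) = false := by simp at hcond ⊢; omega
      simp [hd]
    rw [this]

-- fold of additions is the sum of the mapped list
theorem foldl_add_sum (f : Int → Int) :
    ∀ (S : List Int) (init : Int),
    S.foldl (fun total s => total + f s) init = init + (S.map f).sum := by
  intro S
  induction S with
  | nil => intro init; simp
  | cons s S ih => intro init; simp [List.foldl_cons, ih]; ring

-- ===== VERDICT =====
theorem breakfastNumber_spec : Claim_equal_breakfastNumber := by
  intro staple drinks x _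
  unfold Spec_breakfastNumber breakfastNumber breakfastNumber_alt
  simp only []
  set S := PySem.List.sorted staple (fun y => y) with hSdef
  set D := PySem.List.sorted drinks (fun y => y) with hDdef
  have hS : S.Pairwise (· ≤ ·) := PySem.List.sorted_pairwise staple (fun y => y)
  have hD : D.Pairwise (· ≤ ·) := PySem.List.sorted_pairwise drinks (fun y => y)
  have hRrev : D.reverse.Pairwise (fun a b => b ≤ a) := List.pairwise_reverse.mpr hD
  congr 1
  rw [loopA_spec x S D.reverse 0 hS hRrev, foldl_add_sum]
  simp only [zero_add]
  refine congrArg List.sum (List.map_congr_left ?_)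
  intro s _
  rw [← bisectRightB_eq_countP D (x - s) hD]
  rw [List.countP_reverse]
  congr 1
  refine List.countP_congr ?_
  intro d _
  simp; omega
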